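-- pv_equiv track=rewrite | github.com/joungjoung/SwiftDynamicsTesting | 1_find_tailing_zero/t.py | count_trailing_zeroes
-- ===== SOURCE A (Python) =====
-- def count_trailing_zeroes(n: int) -> int:
--     if n < 0:
--         raise ValueError("n ต้องเป็นจำนวนเต็มไม่ติดลบ")
--
--     count = 0
--     while n % 10 == 0 and n != 0:
--         count += 1
--         n //= 10
--     return count
-- ===== SOURCE B (Python) =====
-- def count_trailing_zeroes(n: int) -> int:
--     if n < 0:
--         raise ValueError("n ต้องเป็นจำนวนเต็มไม่ติดลบ")
--     if n == 0:
--         return 0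
--     s = str(n)
--     return len(s) - len(s.rstrip('0'))
-- ===== Notes on version B (the rewrite author's own statement) =====
-- stated objective: idiomatic
-- what changed: Replaces the arithmetic divmod loop with a string computation: len(str(n)) - len(str(n).rstrip('0')), with an explicit 0 case.
import Mathlib
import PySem

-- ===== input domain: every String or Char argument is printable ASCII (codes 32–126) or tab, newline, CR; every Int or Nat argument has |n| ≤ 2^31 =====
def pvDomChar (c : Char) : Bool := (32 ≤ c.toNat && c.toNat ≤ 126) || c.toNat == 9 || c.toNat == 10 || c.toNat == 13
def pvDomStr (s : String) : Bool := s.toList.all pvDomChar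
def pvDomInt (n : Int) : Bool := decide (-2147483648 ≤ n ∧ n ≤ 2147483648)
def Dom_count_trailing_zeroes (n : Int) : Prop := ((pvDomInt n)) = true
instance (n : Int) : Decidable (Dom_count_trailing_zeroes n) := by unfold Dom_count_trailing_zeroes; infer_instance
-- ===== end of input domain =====

-- B replaces A's divmod loop with len(str(n)) - len(str(n).rstrip('0')) (idiomatic, same cost).

-- ===== PORT A =====
-- the 'while n % 10 == 0 and n != 0' loop, threading (n, count); terminates on |n|
def ctzLoopA (n : Int) (count : Int) : Int :=
  if h : PySem.Int.mod n 10 = 0 ∧ n ≠ 0 then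
    ctzLoopA (PySem.Int.floordiv n 10) (count + 1)
  else count
termination_by n.natAbs
decreasing_by
  have hdvd : (10 : Int) ∣ n := Int.dvd_of_fmod_eq_zero h.1
  obtain ⟨k, hk⟩ := hdvd
  have hfd : PySem.Int.floordiv n 10 = k := by
    simp [PySem.Int.floordiv, hk, Int.mul_fdiv_cancel_left _ (by norm_num : (10:Int) ≠ 0)]
  rw [hfd]
  have hk0 : k ≠ 0 := by rintro rfl; exact h.2 (by simp [hk])
  have h1 : n.natAbs = 10 * k.natAbs := by rw [hk, Int.natAbs_mul]; rfl
  have h2 : 1 ≤ k.natAbs := Nat.one_le_iff_ne_zero.mpr (Int.natAbs_ne_zero.mpr hk0)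
  omega

def count_trailing_zeroes (n : Int) : Int := ctzLoopA n 0

-- ===== PORT B =====
-- s.rstrip('0') ported by hand (PySem has no chars-argument rstrip): drop '0's from the
-- reversed character list and reverse back — exact for rstrip with the single char '0'.
def count_trailing_zeroes_alt (n : Int) : Int :=
  if n = 0 then 0
  else
    let s := PySem.Int.toChars n
    let r := (List.dropWhile (fun c => c == '0') s.reverse).reverse
    PySem.List.len s - PySem.List.len r

-- ===== PRECONDITION & SPEC =====
-- Pre_ excludes exactly n < 0, on which A raises ValueError.
def Pre_count_trailing_zeroes (n : Int) : Prop := 0 ≤ n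
instance (n : Int) : Decidable (Pre_count_trailing_zeroes n) := by unfold Pre_count_trailing_zeroes; infer_instance
def pvWitness_count_trailing_zeroes : Int := 1000

def Spec_count_trailing_zeroes (n : Int) (out : Int) : Prop := out = count_trailing_zeroes_alt n
instance (n : Int) (out : Int) : Decidable (Spec_count_trailing_zeroes n out) := by unfold Spec_count_trailing_zeroes; infer_instance

-- ===== CLAIM (what is proved, stated in full; the proofs are below) =====
def Claim_equal_count_trailing_zeroes : Prop := ∀ (n : Int), Dom_count_trailing_zeroes n → Pre_count_trailing_zeroes n → Spec_count_trailing_zeroes n (count_trailing_zeroes n)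

-- ===== LEMMAS AND PROOFS =====

-- the trailing-'0' count of the decimal string of m, as B computes it
def strZeros (m : Nat) : Nat :=
  (Nat.toDigits 10 m).length - ((Nat.toDigits 10 m).reverse.dropWhile (fun c => c == '0')).length

-- toDigitsCore: accumulator comes out appended
theorem toDigitsCore_acc (fuel : Nat) : ∀ (n : Nat) (acc : List Char), n < fuel →
    Nat.toDigitsCore 10 fuel n acc = Nat.toDigitsCore 10 fuel n [] ++ acc := by
  induction fuel with
  | zero => intro n acc h; omega
  | succ f ih =>
    intro n acc h
    simp only [Nat.toDigitsCore]
    by_cases h0 : n / 10 = 0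
    · simp [h0]
    · have hlt : n / 10 < f := by
        have : n / 10 < n := Nat.div_lt_self (by omega) (by norm_num)
        omega
      simp only [h0, if_false]
      rw [ih _ _ hlt, ih _ ((n % 10).digitChar :: []) hlt]
      simp

-- toDigitsCore: fuel irrelevance
theorem toDigitsCore_fuel (f1 : Nat) : ∀ (f2 n : Nat), n < f1 → n < f2 →
    Nat.toDigitsCore 10 f1 n [] = Nat.toDigitsCore 10 f2 n [] := by
  induction f1 with
  | zero => intro f2 n h; omega
  | succ f ih =>
    intro f2 n h1 h2
    cases f2 with
    | zero => omega
    | succ g =>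
      simp only [Nat.toDigitsCore]
      by_cases h0 : n / 10 = 0
      · simp [h0]
      · have hn : n / 10 < n := Nat.div_lt_self (by omega) (by norm_num)
        simp only [h0, if_false]
        rw [toDigitsCore_acc f _ _ (by omega), toDigitsCore_acc g _ _ (by omega),
          ih g (n / 10) (by omega) (by omega)]

-- one unfolding step of toDigits for n ≥ 10
theorem toDigits_step (n : Nat) (h : n / 10 ≠ 0) :
    Nat.toDigits 10 n = Nat.toDigits 10 (n / 10) ++ [(n % 10).digitChar] := by
  show Nat.toDigitsCore 10 (n + 1) n [] = Nat.toDigitsCore 10 (n / 10 + 1) (n / 10) [] ++ _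
  have hn : n / 10 < n := Nat.div_lt_self (by omega) (by norm_num)
  conv_lhs => rw [Nat.toDigitsCore]
  simp only [h, if_false]
  rw [toDigitsCore_acc n _ _ (by omega), toDigitsCore_fuel n (n / 10 + 1) (n / 10) (by omega) (by omega)]

theorem toDigits_small (n : Nat) (h : n / 10 = 0) :
    Nat.toDigits 10 n = [n.digitChar] := by
  show Nat.toDigitsCore 10 (n + 1) n [] = _
  have hlt : n < 10 := by omega
  rw [Nat.toDigitsCore]
  simp [h, Nat.mod_eq_of_lt hlt]

theorem digitChar_ne_zero (d : Nat) (h1 : d ≠ 0) (h2 : d < 10) : (d.digitChar == '0') = false := by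
  interval_cases d <;> simp_all <;> decide

-- trailing-zero step of the string count when 10 ∣ m
theorem strZeros_div (m : Nat) (h0 : 0 < m) (hdvd : 10 ∣ m) :
    strZeros m = strZeros (m / 10) + 1 := by
  have h10 : 10 ≤ m := Nat.le_of_dvd h0 hdvd
  have hq : m / 10 ≠ 0 := by
    have := Nat.div_le_div_right (c := 10) h10
    simp at this; omega
  have hmod : m % 10 = 0 := Nat.mod_eq_zero_of_dvd hdvd
  have hlen := List.length_dropWhile_le (fun c => c == '0') (Nat.toDigits 10 (m / 10)).reverse
  unfold strZeros
  rw [toDigits_step m hq, hmod]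
  simp only [List.reverse_append, List.reverse_cons, List.reverse_nil, List.nil_append,
    List.singleton_append, List.dropWhile_cons, List.length_append, List.length_cons]
  norm_num [Nat.digitChar]
  simp only [List.length_reverse] at hlen ⊢
  omega

-- the string count is 0 when the last digit is nonzero
theorem strZeros_ndvd (m : Nat) (h0 : 0 < m) (hdvd : ¬ 10 ∣ m) : strZeros m = 0 := by
  have hmod : m % 10 ≠ 0 := fun h => hdvd (Nat.dvd_of_mod_eq_zero h)
  unfold strZeros
  by_cases hq : m / 10 = 0
  · have hm : m % 10 = m := Nat.mod_eq_of_lt (by omega)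
    rw [toDigits_small m hq]
    simp [digitChar_ne_zero m (by omega) (by omega)]
  · rw [toDigits_step m hq]
    simp [digitChar_ne_zero (m % 10) hmod (Nat.mod_lt _ (by norm_num))]

-- the loop computes count + strZeros for positive inputs
theorem loop_eq_strZeros (m : Nat) : ∀ count : Int, 0 < m →
    ctzLoopA (m : Int) count = count + (strZeros m : Int) := by
  induction m using Nat.strong_induction_on with
  | _ m ih =>
    intro count h0
    rw [ctzLoopA]
    have hmod : PySem.Int.mod (m : Int) 10 = ((m % 10 : Nat) : Int) := by
      show Int.fmod _ _ = _
      rw [Int.fmod_eq_emod]; push_cast; simp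
    have hdiv : PySem.Int.floordiv (m : Int) 10 = ((m / 10 : Nat) : Int) := by
      show Int.fdiv _ _ = _
      rw [Int.fdiv_eq_ediv]; push_cast; simp
    by_cases hdvd : 10 ∣ m
    · have h10 : 10 ≤ m := Nat.le_of_dvd h0 hdvd
      have hcond : PySem.Int.mod (m : Int) 10 = 0 ∧ (m : Int) ≠ 0 := by
        refine ⟨by rw [hmod, Nat.mod_eq_zero_of_dvd hdvd]; rfl, ?_⟩
        exact_mod_cast (by omega : m ≠ 0)
      rw [dif_pos hcond, hdiv, ih (m / 10) (Nat.div_lt_self h0 (by norm_num)) (count + 1) (by omega),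
        strZeros_div m h0 hdvd]
      push_cast
      ring
    · have hcond : ¬ (PySem.Int.mod (m : Int) 10 = 0 ∧ (m : Int) ≠ 0) := by
        rintro ⟨h1, -⟩
        rw [hmod] at h1
        exact hdvd (Nat.dvd_of_mod_eq_zero (by exact_mod_cast h1))
      rw [dif_neg hcond, strZeros_ndvd m h0 hdvd]
      simp

-- B's expression equals the string trailing-zero count for positive n
theorem alt_eq_strZeros (n : Int) (h : 0 < n) :
    count_trailing_zeroes_alt n = (strZeros n.toNat : Int) := by
  have hne : n ≠ 0 := by omega
  have hlen := List.length_dropWhile_le (fun c => c == '0') (Nat.toDigits 10 n.toNat).reverse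
  simp only [count_trailing_zeroes_alt, if_neg hne, PySem.Int.toChars,
    if_neg (by omega : ¬ n < 0), PySem.List.len, List.length_reverse, strZeros]
  simp only [List.length_reverse] at hlen
  omega

-- ===== VERDICT (by name: the statement is the Claim_ definition above) =====
theorem count_trailing_zeroes_spec : Claim_equal_count_trailing_zeroes := by
  intro n hdom hpre
  unfold Spec_count_trailing_zeroes count_trailing_zeroes
  by_cases h0 : n = 0
  · subst h0
    rw [ctzLoopA]
    norm_num [count_trailing_zeroes_alt]
  · have hpos : 0 < n := lt_of_le_of_ne hpre (Ne.symm h0)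
    rw [alt_eq_strZeros n hpos]
    have hm : (n.toNat : Int) = n := Int.toNat_of_nonneg hpre
    rw [← hm, loop_eq_strZeros n.toNat 0 (by omega)]
    simp [max_eq_left hpre]
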